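-- pv_equiv track=rewrite | github.com/Nayald/algorithm-portfolio | leetcode/daily challenges/2021-01/27-concatenation-of-consecutive-binary-numbers.py | concatenatedBinary
-- ===== SOURCE A (Python) =====
-- def concatenatedBinary(n: int) -> int:
--     result = 1
--     i = 2
--     while i <= n:
--         result <<= i.bit_length()
--         result += i
--         result %= 1000000007
--         i += 1
--
--     return result
-- ===== SOURCE B (Python) =====
-- def concatenatedBinary(n: int) -> int:
--     MOD = 1000000007
--     res = 0
--     pw = 1  # modular weight 2^(total bits of the numbers already placed to the right)
--     for i in range(n, 1, -1):
--         res = (res + i * pw) % MOD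
--         pw = (pw << i.bit_length()) % MOD
--     return (res + pw) % MOD
-- ===== Notes on version B (the rewrite author's own statement) =====
-- stated objective: alternative
-- what changed: B iterates downward over the numbers and accumulates a place-value weighted sum (res + i*weight) while maintaining the modular weight of the digits already placed, instead of A's forward Horner shift-and-add of the running result.
import Mathlib
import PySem

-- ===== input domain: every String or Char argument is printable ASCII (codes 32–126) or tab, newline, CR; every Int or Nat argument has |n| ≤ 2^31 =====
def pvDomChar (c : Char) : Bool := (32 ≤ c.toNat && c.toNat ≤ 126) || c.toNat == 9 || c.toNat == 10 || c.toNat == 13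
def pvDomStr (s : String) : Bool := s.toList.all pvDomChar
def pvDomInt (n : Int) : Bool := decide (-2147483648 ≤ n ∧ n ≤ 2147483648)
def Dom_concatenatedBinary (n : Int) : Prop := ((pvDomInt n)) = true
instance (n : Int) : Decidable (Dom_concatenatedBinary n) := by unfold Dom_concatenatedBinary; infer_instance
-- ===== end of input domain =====

-- B changes the traversal: it sums i·weight downward maintaining a modular place-value
-- weight, instead of A's forward Horner shift-and-add (objective: alternative, same cost).

-- ===== PORT A =====
-- one iteration of A's while-body: result <<= i.bit_length(); result += i; result %= 10**9+7
def pvStepA (result i : Int) : Int :=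
  PySem.Int.mod ((result <<< PySem.Int.bitLength i) + i) 1000000007

def concatenatedBinary (n : Int) : Int :=
  (PySem.List.pyRange 2 (n + 1) 1).foldl pvStepA 1

-- ===== PORT B =====
-- one iteration of B's for-body: res = (res + i*pw) % MOD; pw = (pw << i.bit_length()) % MOD
def pvStepB (s : Int × Int) (i : Int) : Int × Int :=
  (PySem.Int.mod (s.1 + i * s.2) 1000000007,
   PySem.Int.mod (s.2 <<< PySem.Int.bitLength i) 1000000007)

def concatenatedBinary_alt (n : Int) : Int :=
  let s := (PySem.List.pyRange n 1 (-1)).foldl pvStepB (0, 1)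
  PySem.Int.mod (s.1 + s.2) 1000000007

-- ===== PRECONDITION & SPEC =====
def Spec_concatenatedBinary (n : Int) (out : Int) : Prop := out = concatenatedBinary_alt n
instance (n : Int) (out : Int) : Decidable (Spec_concatenatedBinary n out) := by unfold Spec_concatenatedBinary; infer_instance

-- ===== CLAIM (what is proved, stated in full; the proofs are below) =====
def Claim_equal_concatenatedBinary : Prop := ∀ (n : Int), Dom_concatenatedBinary n → Spec_concatenatedBinary n (concatenatedBinary n)

-- ===== LEMMAS AND PROOFS =====

-- A's step, with Python mod replaced by emod (divisor is positive)
theorem pvStepA_eq (r i : Int) :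
    pvStepA r i = (r * 2 ^ PySem.Int.bitLength i + i) % 1000000007 := by
  simp [pvStepA, Int.shiftLeft_eq]

theorem pvStepB_eq (s : Int × Int) (i : Int) :
    pvStepB s i = ((s.1 + i * s.2) % 1000000007,
                   (s.2 * 2 ^ PySem.Int.bitLength i) % 1000000007) := by
  simp [pvStepB, Int.shiftLeft_eq]

-- a nonempty A-fold ends with a % 1000000007, hence is fixed by % 1000000007
theorem pvFoldA_emod (l : List Int) (r : Int) (hl : l ≠ []) :
    l.foldl pvStepA r % 1000000007 = l.foldl pvStepA r := by
  induction l generalizing r with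
  | nil => exact absurd rfl hl
  | cons x t ih =>
    cases t with
    | nil => simp [pvStepA_eq, Int.emod_emod_of_dvd]
    | cons y u => exact ih _ (by simp)

-- key invariant: Horner fold from the left = weighted sum fold over the reverse, mod M
theorem pvKey (l : List Int) (r : Int) :
    l.foldl pvStepA r % 1000000007 =
      (r * (l.reverse.foldl pvStepB (0, 1)).2 + (l.reverse.foldl pvStepB (0, 1)).1)
        % 1000000007 := by
  induction l generalizing r with
  | nil => simp
  | cons x t ih =>
    have hrev : (x :: t).reverse = t.reverse ++ [x] := by simp
    rw [List.foldl_cons, ih, hrev, List.foldl_append]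
    set S := (t.reverse.foldl pvStepB (0, 1)).1 with hS
    set P := (t.reverse.foldl pvStepB (0, 1)).2 with hP
    rw [pvStepA_eq, List.foldl_cons, List.foldl_nil, pvStepB_eq]
    have h1 : ((r * 2 ^ PySem.Int.bitLength x + x) % 1000000007) * P + S ≡
        (r * 2 ^ PySem.Int.bitLength x + x) * P + S [ZMOD 1000000007] :=
      Int.ModEq.add_right S (Int.ModEq.mul_right P (Int.emod_emod_of_dvd _ dvd_rfl))
    have h2 : r * ((P * 2 ^ PySem.Int.bitLength x) % 1000000007)
          + (S + x * P) % 1000000007 ≡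
        r * (P * 2 ^ PySem.Int.bitLength x) + (S + x * P) [ZMOD 1000000007] :=
      Int.ModEq.add (Int.ModEq.mul_left r (Int.emod_emod_of_dvd _ dvd_rfl))
        (Int.emod_emod_of_dvd _ dvd_rfl)
    calc ((r * 2 ^ PySem.Int.bitLength x + x) % 1000000007) * P + S
          ≡ (r * 2 ^ PySem.Int.bitLength x + x) * P + S [ZMOD 1000000007] := h1
      _ = r * (P * 2 ^ PySem.Int.bitLength x) + (S + x * P) := by ring
      _ ≡ r * ((P * 2 ^ PySem.Int.bitLength x) % 1000000007)
            + (S + x * P) % 1000000007 [ZMOD 1000000007] := h2.symm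

-- ===== VERDICT (by name: the statement is the Claim_ definition above) =====
theorem concatenatedBinary_spec : Claim_equal_concatenatedBinary := by
  intro n _
  show concatenatedBinary n = concatenatedBinary_alt n
  unfold concatenatedBinary concatenatedBinary_alt
  have hrev : PySem.List.pyRange n 1 (-1) = (PySem.List.pyRange 2 (n + 1) 1).reverse := by
    have := PySem.List.pyRange_neg_one_eq_reverse n 1
    norm_num at this
    exact this
  rw [hrev]
  simp only [PySem.Int.mod_eq_emod_of_pos (by norm_num : (0:Int) < 1000000007)]
  by_cases h : n + 1 ≤ 2
  · rw [PySem.List.pyRange_one_eq_nil h]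
    norm_num
  · have hne : PySem.List.pyRange 2 (n + 1) 1 ≠ [] := by
      rw [PySem.List.pyRange_one_cons (by omega : (2:Int) < n + 1)]
      simp
    rw [← pvFoldA_emod _ 1 hne, pvKey]
    ring_nf
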